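-- pv_equiv track=rewrite | github.com/Control39/portfolio-system-architect | scripts/sync_projects_by_hash.py | compare_directories
-- ===== SOURCE A (Python) =====
-- def compare_directories(source_map, target_map):
--     """Сравнивает два словаря файлов.
--     Возвращает:
--       - missing: файлы, которые есть в source, но отсутствуют в target
--       - different: файлы с одинаковым путём, но разным хэшем
--       - extra: файлы, которые есть в target, но отсутствуют в source (опционально)
--     """
--     missing = {}
--     different = {}
--     extra = {}
--
--     # Проверяем файлы из source
--     for rel_path, src_info in source_map.items():
--         if rel_path not in target_map:
--             missing[rel_path] = src_info
--         else:
--             tgt_info = target_map[rel_path]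
--             if src_info["hash"] != tgt_info["hash"]:
--                 different[rel_path] = {
--                     "source": src_info,
--                     "target": tgt_info,
--                 }
--
--     # Файлы, которые есть только в target (возможно, устаревшие)
--     for rel_path, tgt_info in target_map.items():
--         if rel_path not in source_map:
--             extra[rel_path] = tgt_info
--
--     return missing, different, extra
-- ===== SOURCE B (Python) =====
-- def compare_directories(source_map, target_map):
--     """Merge-join rewrite: build one combined dict pairing each path with its
--     (source_info, target_info) (absent side = None), then classify every merged
--     entry in a single pass -- no membership tests of one map against the other."""
--     merged = {}
--     for k, v in source_map.items():
--         merged[k] = (v, None)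
--     for k, v in target_map.items():
--         prev = merged.get(k)
--         merged[k] = (None, v) if prev is None else (prev[0], v)
--     missing = {}
--     different = {}
--     extra = {}
--     for k, (s, t) in merged.items():
--         if s is not None and t is not None:
--             if s["hash"] != t["hash"]:
--                 different[k] = {"source": s, "target": t}
--         elif s is not None:
--             missing[k] = s
--         else:
--             extra[k] = t
--     return missing, different, extra
-- ===== Notes on version B (the rewrite author's own statement) =====
-- stated objective: alternative
-- what changed: A's two loops with per-key membership tests against the other dict are replaced by a merge-join: one combined dict maps each path to its (source_info, target_info) pair (absent side None), then a single classification pass over the merged entries partitions them into missing/different/extra.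
import Mathlib
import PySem

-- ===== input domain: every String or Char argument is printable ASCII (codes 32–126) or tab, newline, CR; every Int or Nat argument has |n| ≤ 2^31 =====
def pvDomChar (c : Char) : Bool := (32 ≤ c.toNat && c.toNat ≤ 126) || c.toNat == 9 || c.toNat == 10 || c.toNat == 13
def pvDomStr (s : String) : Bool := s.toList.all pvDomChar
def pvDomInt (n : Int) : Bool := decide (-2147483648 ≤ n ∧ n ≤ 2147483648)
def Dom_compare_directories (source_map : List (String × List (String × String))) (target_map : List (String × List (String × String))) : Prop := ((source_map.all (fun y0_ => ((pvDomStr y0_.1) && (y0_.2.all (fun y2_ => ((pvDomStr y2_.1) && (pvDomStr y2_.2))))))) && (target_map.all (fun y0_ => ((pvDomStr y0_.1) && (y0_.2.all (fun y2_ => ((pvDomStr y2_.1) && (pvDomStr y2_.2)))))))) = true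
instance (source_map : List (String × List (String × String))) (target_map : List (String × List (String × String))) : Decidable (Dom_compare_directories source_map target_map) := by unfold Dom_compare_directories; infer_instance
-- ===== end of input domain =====

-- B replaces A's two membership-test loops by a merge-join: one combined dict of (source_info, target_info) pairs, then a single classification pass (objective: alternative).


-- ===== PORT A =====
-- body of A's first loop, as a named helper (one dict lookup, then the if/else branching of A)
def stepA (target_map : List (String × List (String × String)))
    (acc : List (String × List (String × String)) × List (String × List (String × List (String × String))))
    (p : String × List (String × String)) :
    List (String × List (String × String)) × List (String × List (String × List (String × String))) :=
  match List.lookup p.1 target_map with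
  | none => (acc.1 ++ [p], acc.2)
  | some tgt_info =>
      if List.lookup "hash" p.2 ≠ List.lookup "hash" tgt_info then
        (acc.1, acc.2 ++ [(p.1, [("source", p.2), ("target", tgt_info)])])
      else acc

-- literal port of A: one fold over source_map carrying the (missing, different) pair, then a second fold over target_map for extra
def compare_directories (source_map : List (String × List (String × String))) (target_map : List (String × List (String × String))) : (List (String × List (String × String))) × (List (String × List (String × List (String × String)))) × (List (String × List (String × String))) :=
  let md := source_map.foldl (stepA target_map) ([], [])
  let extra := target_map.foldl
    (fun acc q => if (List.lookup q.1 source_map).isNone then acc ++ [q] else acc) []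
  (md.1, md.2, extra)

-- ===== PORT B =====
-- B's first loop: seed the merged dict with (source_info, None) per source path
def stepSrcB (d : PySem.Dict String (Option (List (String × String)) × Option (List (String × String))))
    (p : String × List (String × String)) :
    PySem.Dict String (Option (List (String × String)) × Option (List (String × String))) :=
  d.insert p.1 (some p.2, none)

-- B's second loop: merged.get(k) then overwrite with the target side filled in
def stepTgtB (d : PySem.Dict String (Option (List (String × String)) × Option (List (String × String))))
    (q : String × List (String × String)) :
    PySem.Dict String (Option (List (String × String)) × Option (List (String × String))) :=
  match d.get? q.1 with
  | none => d.insert q.1 (none, some q.2)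
  | some prev => d.insert q.1 (prev.1, some q.2)

-- B's classification loop body ((none, none) is unreachable in Source B: a merged entry always has a side)
def classifyB
    (acc : List (String × List (String × String)) × List (String × List (String × List (String × String))) × List (String × List (String × String)))
    (e : String × (Option (List (String × String)) × Option (List (String × String)))) :
    List (String × List (String × String)) × List (String × List (String × List (String × String))) × List (String × List (String × String)) :=
  match e.2 with
  | (some s, some t) =>
      if List.lookup "hash" s ≠ List.lookup "hash" t then
        (acc.1, acc.2.1 ++ [(e.1, [("source", s), ("target", t)])], acc.2.2)
      else acc
  | (some s, none) => (acc.1 ++ [(e.1, s)], acc.2.1, acc.2.2)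
  | (none, some t) => (acc.1, acc.2.1, acc.2.2 ++ [(e.1, t)])
  | (none, none) => acc

-- literal port of Source B: two merge folds building one dict, then one classification fold over its items
def compare_directories_alt (source_map : List (String × List (String × String))) (target_map : List (String × List (String × String))) : (List (String × List (String × String))) × (List (String × List (String × List (String × String)))) × (List (String × List (String × String))) :=
  let merged := target_map.foldl stepTgtB (source_map.foldl stepSrcB PySem.Dict.empty)
  merged.items.foldl classifyB ([], [], [])

-- ===== PRECONDITION & SPEC =====
-- Pre_ excludes only inputs the Python function cannot faithfully receive or on which it raises:
-- duplicate keys at either dict level (a Python dict cannot carry them), and a common path whose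
-- source or target info dict lacks the "hash" key (A raises KeyError there).
def Pre_compare_directories (source_map : List (String × List (String × String))) (target_map : List (String × List (String × String))) : Prop :=
  (source_map.map Prod.fst).Nodup ∧ (target_map.map Prod.fst).Nodup ∧
  (∀ p ∈ source_map, (p.2.map Prod.fst).Nodup) ∧
  (∀ q ∈ target_map, (q.2.map Prod.fst).Nodup) ∧
  (∀ p ∈ source_map, ∀ q ∈ target_map, p.1 = q.1 →
    (List.lookup "hash" p.2).isSome ∧ (List.lookup "hash" q.2).isSome)
instance (source_map : List (String × List (String × String))) (target_map : List (String × List (String × String))) : Decidable (Pre_compare_directories source_map target_map) := by unfold Pre_compare_directories; infer_instance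

def pvWitness_compare_directories : (List (String × List (String × String))) × (List (String × List (String × String))) :=
  ([("a", [("hash", "1")]), ("b", [("hash", "2")])], [("a", [("hash", "9")]), ("c", [("hash", "3")])])

def Spec_compare_directories (source_map : List (String × List (String × String))) (target_map : List (String × List (String × String))) (out : (List (String × List (String × String))) × (List (String × List (String × List (String × String)))) × (List (String × List (String × String)))) : Prop := out = compare_directories_alt source_map target_map
instance (source_map : List (String × List (String × String))) (target_map : List (String × List (String × String))) (out : (List (String × List (String × String))) × (List (String × List (String × List (String × String)))) × (List (String × List (String × String)))) : Decidable (Spec_compare_directories source_map target_map out) := by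
  unfold Spec_compare_directories
  letI d5 : DecidableEq (List (String × List (String × List (String × String)))) := instDecidableEqList
  infer_instance

-- ===== CLAIM (what is proved, stated in full; the proofs are below) =====
def Claim_equal_compare_directories : Prop := ∀ (source_map : List (String × List (String × String))) (target_map : List (String × List (String × String))), Dom_compare_directories source_map target_map → Pre_compare_directories source_map target_map → Spec_compare_directories source_map target_map (compare_directories source_map target_map)

-- ===== LEMMAS AND PROOFS =====

-- the per-element selector of the 'different' list, shared by both canonical forms below
def diffSel (target_map : List (String × List (String × String)))
    (p : String × List (String × String)) :
    Option (String × List (String × List (String × String))) :=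
  match List.lookup p.1 target_map with
  | some tgt_info =>
      if List.lookup "hash" p.2 ≠ List.lookup "hash" tgt_info then
        some (p.1, [("source", p.2), ("target", tgt_info)])
      else none
  | none => none

-- A's source loop, started from any accumulator pair, produces filter and filterMap appended to it.
theorem loopA_eq (target_map : List (String × List (String × String)))
    (source_map : List (String × List (String × String)))
    (acc1 : List (String × List (String × String)))
    (acc2 : List (String × List (String × List (String × String)))) :
    source_map.foldl (stepA target_map) (acc1, acc2)
    = (acc1 ++ source_map.filter (fun p => (List.lookup p.1 target_map).isNone),
       acc2 ++ source_map.filterMap (diffSel target_map)) := by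
  induction source_map generalizing acc1 acc2 with
  | nil => simp
  | cons hd tl ih =>
      rw [List.foldl_cons]
      cases hlk : List.lookup hd.1 target_map with
      | none =>
          rw [show stepA target_map (acc1, acc2) hd = (acc1 ++ [hd], acc2) from by
            simp [stepA, hlk]]
          rw [ih]
          simp [diffSel, hlk]
      | some tgt_info =>
          by_cases hne : List.lookup "hash" hd.2 ≠ List.lookup "hash" tgt_info
          · rw [show stepA target_map (acc1, acc2) hd
                = (acc1, acc2 ++ [(hd.1, [("source", hd.2), ("target", tgt_info)])]) from by
              simp [stepA, hlk, hne]]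
            rw [ih]
            simp [diffSel, hlk, hne]
          · rw [show stepA target_map (acc1, acc2) hd = (acc1, acc2) from by
              simp only [not_not] at hne
              simp [stepA, hlk, hne]]
            rw [ih]
            simp only [not_not] at hne
            simp [diffSel, hlk, hne]

-- lookup in a key-preserving map
theorem lookup_map_key {V : Type} (g : String × List (String × String) → V)
    (s : List (String × List (String × String))) (x : String) :
    List.lookup x (s.map (fun p => (p.1, g p)))
    = (s.find? (fun p => x == p.1)).map g := by
  induction s with
  | nil => simp
  | cons hd tl ih =>
      by_cases h : x = hd.1
      · simp [List.find?, h]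
      · simp [List.lookup, List.find?, beq_false_of_ne h, ih]

-- List.lookup as find?
theorem lookup_eq_map_find? (s : List (String × List (String × String))) (x : String) :
    List.lookup x s = (s.find? (fun p => x == p.1)).map Prod.snd := by
  induction s with
  | nil => simp
  | cons hd tl ih =>
      by_cases h : x = hd.1
      · simp [List.lookup, List.find?, h]
      · simp [List.lookup, List.find?, beq_false_of_ne h, ih]

-- with nodup keys, any member is the lookup result at its own key
theorem lookup_of_mem_nodup (s : List (String × List (String × String)))
    (hs : (s.map Prod.fst).Nodup) (p : String × List (String × String)) (hp : p ∈ s) :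
    List.lookup p.1 s = some p.2 := by
  induction s with
  | nil => cases hp
  | cons hd tl ih =>
      simp only [List.map_cons, List.nodup_cons] at hs
      rcases List.mem_cons.mp hp with h | h
      · subst h; simp [List.lookup]
      · have hne : p.1 ≠ hd.1 := by
          intro he
          exact hs.1 (he ▸ List.mem_map_of_mem h)
        simp [List.lookup, beq_false_of_ne hne, ih hs.2 h]

-- get? on a literal dict is List.lookup
theorem get?_mk {V : Type} (l : List (String × V)) (x : String) :
    (PySem.Dict.mk l).get? x = List.lookup x l := by
  induction l with
  | nil => simp [PySem.Dict.get?, List.lookup]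
  | cons hd tl ih =>
      rw [show hd = (hd.1, hd.2) from rfl, PySem.Dict.get?_mk_cons]
      by_cases h : x = hd.1
      · simp [List.lookup, h]
      · simp [List.lookup, beq_false_of_ne h, beq_false_of_ne (Ne.symm h), ih]

-- lookup distributes over append
theorem lookup_append {V : Type} (l1 l2 : List (String × V)) (x : String) :
    List.lookup x (l1 ++ l2) = (List.lookup x l1).or (List.lookup x l2) := by
  induction l1 with
  | nil => simp
  | cons hd tl ih =>
      by_cases h : x = hd.1
      · simp [List.lookup, h]
      · simp [List.lookup, beq_false_of_ne h, ih]

-- lookup misses when the key is absent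
theorem lookup_eq_none_of_not_mem {V : Type} (l : List (String × V)) (x : String)
    (h : x ∉ l.map Prod.fst) : List.lookup x l = none := by
  induction l with
  | nil => rfl
  | cons hd tl ih =>
      simp only [List.map_cons, List.mem_cons, not_or] at h
      simp [List.lookup, beq_false_of_ne h.1, ih h.2]

-- a literal dict's items field
theorem items_mk {V : Type} (l : List (String × V)) : (PySem.Dict.mk l).items = l := rfl

-- the merge invariant: B's target loop over a dict of shape (source part updated by f, extra part E)
theorem merge_tgt (t : List (String × List (String × String))) :
    ∀ (s E : List (String × List (String × String)))
      (f : String → Option (List (String × String))),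
    (s.map Prod.fst).Nodup →
    (t.map Prod.fst).Nodup →
    (∀ q ∈ t, q.1 ∉ E.map Prod.fst) →
    (t.foldl stepTgtB (PySem.Dict.mk
        (s.map (fun p => (p.1, ((some p.2 : Option (List (String × String))), f p.1)))
         ++ E.map (fun q => (q.1, ((none : Option (List (String × String))), some q.2)))))).items
    = s.map (fun p => (p.1, ((some p.2 : Option (List (String × String))), (List.lookup p.1 t).or (f p.1))))
      ++ (E ++ t.filter (fun q => (List.lookup q.1 s).isNone)).map
           (fun q => (q.1, ((none : Option (List (String × String))), some q.2))) := by
  induction t with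
  | nil =>
      intro s E f hs ht hE
      simp
  | cons q t' ih =>
      intro s E f hs ht hE
      simp only [List.map_cons, List.nodup_cons] at ht
      have hEq : q.1 ∉ E.map Prod.fst := hE q (List.mem_cons_self)
      have hE' : ∀ r ∈ t', r.1 ∉ E.map Prod.fst := fun r hr => hE r (List.mem_cons_of_mem _ hr)
      rw [List.foldl_cons]
      have hlookupE : List.lookup q.1 (E.map (fun r => (r.1, ((none : Option (List (String × String))), some r.2)))) = none := by
        apply lookup_eq_none_of_not_mem
        simpa using hEq
      cases hq : List.lookup q.1 s with
      | some v =>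
          -- q.1 is a source key: the insert overwrites the source entry in place
          obtain ⟨p0, hfind, hp0v⟩ : ∃ p0, s.find? (fun p => q.1 == p.1) = some p0 ∧ p0.2 = v := by
            rw [lookup_eq_map_find?] at hq
            cases hf : s.find? (fun p => q.1 == p.1) with
            | none => rw [hf] at hq; cases hq
            | some p0 => rw [hf] at hq; exact ⟨p0, rfl, Option.some.inj hq⟩
          have hp0k : p0.1 = q.1 := by
            have := List.find?_some hfind
            exact (eq_of_beq this).symm
          have hget : (PySem.Dict.mk
              (s.map (fun p => (p.1, ((some p.2 : Option (List (String × String))), f p.1)))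
               ++ E.map (fun r => (r.1, ((none : Option (List (String × String))), some r.2))))).get? q.1
              = some (some v, f q.1) := by
            rw [get?_mk, lookup_append, lookup_map_key, hfind, hlookupE]
            simp [hp0k, hp0v]
          rw [show stepTgtB (PySem.Dict.mk
              (s.map (fun p => (p.1, ((some p.2 : Option (List (String × String))), f p.1)))
               ++ E.map (fun r => (r.1, ((none : Option (List (String × String))), some r.2))))) q
              = (PySem.Dict.mk
              (s.map (fun p => (p.1, ((some p.2 : Option (List (String × String))), f p.1)))
               ++ E.map (fun r => (r.1, ((none : Option (List (String × String))), some r.2))))).insert q.1 (some v, some q.2) from by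
            unfold stepTgtB
            rw [hget]]
          have hc : (PySem.Dict.mk
              (s.map (fun p => (p.1, ((some p.2 : Option (List (String × String))), f p.1)))
               ++ E.map (fun r => (r.1, ((none : Option (List (String × String))), some r.2))))).contains q.1 = true := by
            rw [PySem.Dict.contains_eq_isSome_get?, hget]
            rfl
          have hmk : (PySem.Dict.mk
              (s.map (fun p => (p.1, ((some p.2 : Option (List (String × String))), f p.1)))
               ++ E.map (fun r => (r.1, ((none : Option (List (String × String))), some r.2))))).insert q.1 (some v, some q.2)
              = PySem.Dict.mk
              (s.map (fun p => (p.1, ((some p.2 : Option (List (String × String))), (fun x => if x = q.1 then some q.2 else f x) p.1)))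
               ++ E.map (fun r => (r.1, ((none : Option (List (String × String))), some r.2)))) := by
            apply PySem.Dict.ext
            rw [PySem.Dict.items_insert_of_contains _ _ hc, items_mk,
              List.map_append, List.map_map, List.map_map]
            congr 1
            · apply List.map_congr_left
              intro p hp
              by_cases h : p.1 = q.1
              · have : List.lookup p.1 s = some p.2 := lookup_of_mem_nodup s hs p hp
                rw [h, hq] at this
                simp [Function.comp, h, Option.some.inj this]
              · simp [Function.comp, beq_false_of_ne h, h]
            · apply List.map_congr_left
              intro r hr
              have : r.1 ≠ q.1 := by
                intro he
                exact hEq (he ▸ List.mem_map_of_mem hr)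
              simp [Function.comp, beq_false_of_ne fun he => this he]
          rw [hmk, ih s E (fun x => if x = q.1 then some q.2 else f x) hs ht.2 hE']
          have hqt' : List.lookup q.1 t' = none :=
            lookup_eq_none_of_not_mem _ _ ht.1
          congr 1
          · apply List.map_congr_left
            intro p hp
            by_cases h : p.1 = q.1
            · rw [show List.lookup p.1 (q :: t') = some q.2 from by
                simp [List.lookup, h]]
              rw [h, hqt']
              simp
            · rw [show List.lookup p.1 (q :: t') = List.lookup p.1 t' from by
                simp [List.lookup, beq_false_of_ne h]]
              simp [h]
          · rw [show List.filter (fun r => (List.lookup r.1 s).isNone) (q :: t')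
                = List.filter (fun r => (List.lookup r.1 s).isNone) t' from by
              simp [hq]]
      | none =>
          -- q.1 is a fresh key: the insert appends a target-only entry
          have hget : (PySem.Dict.mk
              (s.map (fun p => (p.1, ((some p.2 : Option (List (String × String))), f p.1)))
               ++ E.map (fun r => (r.1, ((none : Option (List (String × String))), some r.2))))).get? q.1
              = none := by
            rw [get?_mk, lookup_append, lookup_map_key, hlookupE]
            rw [lookup_eq_map_find?] at hq
            cases hf : s.find? (fun p => q.1 == p.1) with
            | none => simp
            | some p0 => rw [hf] at hq; cases hq
          rw [show stepTgtB (PySem.Dict.mk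
              (s.map (fun p => (p.1, ((some p.2 : Option (List (String × String))), f p.1)))
               ++ E.map (fun r => (r.1, ((none : Option (List (String × String))), some r.2))))) q
              = (PySem.Dict.mk
              (s.map (fun p => (p.1, ((some p.2 : Option (List (String × String))), f p.1)))
               ++ E.map (fun r => (r.1, ((none : Option (List (String × String))), some r.2))))).insert q.1 (none, some q.2) from by
            unfold stepTgtB
            rw [hget]]
          have hc : (PySem.Dict.mk
              (s.map (fun p => (p.1, ((some p.2 : Option (List (String × String))), f p.1)))
               ++ E.map (fun r => (r.1, ((none : Option (List (String × String))), some r.2))))).contains q.1 = false := by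
            rw [PySem.Dict.contains_eq_isSome_get?, hget]
            rfl
          have hmk : (PySem.Dict.mk
              (s.map (fun p => (p.1, ((some p.2 : Option (List (String × String))), f p.1)))
               ++ E.map (fun r => (r.1, ((none : Option (List (String × String))), some r.2))))).insert q.1 (none, some q.2)
              = PySem.Dict.mk
              (s.map (fun p => (p.1, ((some p.2 : Option (List (String × String))), f p.1)))
               ++ (E ++ [q]).map (fun r => (r.1, ((none : Option (List (String × String))), some r.2)))) := by
            apply PySem.Dict.ext
            rw [PySem.Dict.items_insert_of_not_contains _ _ hc, items_mk,
              List.map_append, List.append_assoc]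
            rfl
          have hE'' : ∀ r ∈ t', r.1 ∉ (E ++ [q]).map Prod.fst := by
            intro r hr
            simp only [List.map_append, List.mem_append, List.map_cons, List.map_nil,
              List.mem_singleton, not_or]
            refine ⟨hE' r hr, ?_⟩
            intro he
            exact ht.1 (he ▸ List.mem_map_of_mem hr)
          rw [hmk, ih s (E ++ [q]) f hs ht.2 hE'']
          congr 1
          · apply List.map_congr_left
            intro p hp
            have h : p.1 ≠ q.1 := by
              intro he
              have := lookup_of_mem_nodup s hs p hp
              rw [he, hq] at this
              cases this
            rw [show List.lookup p.1 (q :: t') = List.lookup p.1 t' from by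
              simp [List.lookup, beq_false_of_ne h]]
          · rw [show List.filter (fun r => (List.lookup r.1 s).isNone) (q :: t')
                = q :: List.filter (fun r => (List.lookup r.1 s).isNone) t' from by
              simp [hq]]
            simp

-- classification over the source part of the merged items
theorem classify_src (tm : List (String × List (String × String)))
    (s : List (String × List (String × String)))
    (a : List (String × List (String × String)))
    (b : List (String × List (String × List (String × String))))
    (c : List (String × List (String × String))) :
    (s.map (fun p => (p.1, ((some p.2 : Option (List (String × String))), List.lookup p.1 tm)))).foldl
        classifyB (a, b, c)
    = (a ++ s.filter (fun p => (List.lookup p.1 tm).isNone),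
       b ++ s.filterMap (diffSel tm), c) := by
  induction s generalizing a b with
  | nil => simp
  | cons hd tl ih =>
      rw [List.map_cons, List.foldl_cons]
      cases hlk : List.lookup hd.1 tm with
      | none =>
          rw [show classifyB (a, b, c) (hd.1, (some hd.2, none)) = (a ++ [(hd.1, hd.2)], b, c) from rfl]
          rw [ih]
          simp [diffSel, hlk]
      | some t =>
          by_cases hne : List.lookup "hash" hd.2 ≠ List.lookup "hash" t
          · rw [show classifyB (a, b, c) (hd.1, (some hd.2, some t))
                = (a, b ++ [(hd.1, [("source", hd.2), ("target", t)])], c) from by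
              simp [classifyB, hne]]
            rw [ih]
            simp [diffSel, hlk, hne]
          · rw [show classifyB (a, b, c) (hd.1, (some hd.2, some t)) = (a, b, c) from by
              simp only [not_not] at hne
              simp [classifyB, hne]]
            rw [ih]
            simp only [not_not] at hne
            simp [diffSel, hlk, hne]

-- classification over the extra part of the merged items
theorem classify_extra (E : List (String × List (String × String)))
    (a : List (String × List (String × String)))
    (b : List (String × List (String × List (String × String))))
    (c : List (String × List (String × String))) :
    (E.map (fun q => (q.1, ((none : Option (List (String × String))), some q.2)))).foldl
        classifyB (a, b, c)
    = (a, b, c ++ E) := by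
  induction E generalizing c with
  | nil => simp
  | cons hd tl ih => simp [classifyB, ih]

-- ===== VERDICT (by name: the statement is the Claim_ definition above) =====
theorem compare_directories_spec : Claim_equal_compare_directories := by
  intro source_map target_map _ hpre
  obtain ⟨hs, ht, -, -, -⟩ := hpre
  unfold Spec_compare_directories compare_directories compare_directories_alt
  dsimp only
  have h1 : source_map.foldl stepSrcB PySem.Dict.empty
      = PySem.Dict.mk
          (source_map.map (fun p => (p.1, ((some p.2 : Option (List (String × String))),
              (fun _ : String => (none : Option (List (String × String)))) p.1)))
           ++ ([] : List (String × List (String × String))).map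
                (fun q => (q.1, ((none : Option (List (String × String))), some q.2)))) := by
    apply PySem.Dict.ext
    rw [items_mk]
    rw [show source_map.foldl stepSrcB PySem.Dict.empty
        = List.foldl (fun d (a : String × List (String × String)) =>
            d.insert a.1 ((some a.2 : Option (List (String × String))),
              (none : Option (List (String × String))))) PySem.Dict.empty source_map from rfl]
    rw [PySem.Dict.items_foldl_insert_fresh source_map Prod.fst _ _ (by simp) hs]
    simp
    rfl
  rw [h1, merge_tgt target_map source_map [] (fun _ => none) hs ht (by simp)]
  have h2 : source_map.map (fun p => (p.1, ((some p.2 : Option (List (String × String))),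
        (List.lookup p.1 target_map).or ((fun _ : String => (none : Option (List (String × String)))) p.1))))
      = source_map.map (fun p => (p.1, ((some p.2 : Option (List (String × String))),
        List.lookup p.1 target_map))) := by
    simp
  rw [h2, List.foldl_append, classify_src, classify_extra]
  rw [loopA_eq, PySem.List.foldl_append_if_eq_filter]
  simp
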